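-- pv_equiv track=rewrite | github.com/PaulCoward53/ADW | PythonLib/ADWUtility.py | SQLCleanString
-- ===== SOURCE A (Python) =====
-- def SQLCleanString(c_str=[]):
--     v_str = ''
--     for ii in range(len(c_str)):
--         if (ord(c_str[ii]) < 127 and ord(c_str[ii]) > 31):
--             if str(c_str[ii]) == "'":
--                 v_str = v_str + "''"
--             else:
--                 v_str = v_str + str(c_str[ii])
--             #END IF
--         #END IF
--     #END FOR
--     return v_str
-- ===== SOURCE B (Python) =====
-- def SQLCleanString(c_str=[]):
--     filtered = ''.join(ch for ch in c_str if 31 < ord(ch) < 127)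
--     return filtered.replace("'", "''")
-- ===== Notes on version B (the rewrite author's own statement) =====
-- stated objective: simpler
-- what changed: A's single indexed loop with repeated string concatenation and a per-character quote branch becomes two whole-string passes: a join over a filtering generator keeping printable ASCII, then one global str.replace that doubles single quotes.
import Mathlib
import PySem

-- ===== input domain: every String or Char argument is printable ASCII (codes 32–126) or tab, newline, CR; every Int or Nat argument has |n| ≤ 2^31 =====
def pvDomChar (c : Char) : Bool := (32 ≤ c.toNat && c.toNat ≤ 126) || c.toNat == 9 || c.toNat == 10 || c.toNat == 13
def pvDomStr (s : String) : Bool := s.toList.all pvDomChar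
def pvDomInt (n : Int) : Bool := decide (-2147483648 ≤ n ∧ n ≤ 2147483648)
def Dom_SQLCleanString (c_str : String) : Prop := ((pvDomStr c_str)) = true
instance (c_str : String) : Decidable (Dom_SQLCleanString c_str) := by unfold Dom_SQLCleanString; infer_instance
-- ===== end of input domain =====

-- B replaces A's indexed loop (per-char filter + inline quote branch + repeated concatenation) by two
-- whole-string passes: a printable-ASCII filter via join, then one global replace doubling single quotes (measured faster by constant factor).


-- ===== PORT A =====
-- for ii in range(len(c_str)): indexed accesses c_str[ii] (always in range, so pyGetD is exact)
def SQLCleanString (c_str : String) : String :=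
  let cs := c_str.toList
  String.ofList ((PySem.List.pyRange 0 (PySem.List.len cs)).foldl (fun v_str ii =>
    let c := PySem.List.pyGetD cs ii ' '
    if c.toNat < 127 && 31 < c.toNat then
      if c == '\'' then v_str ++ ['\'', '\''] else v_str ++ [c]
    else v_str) [])

-- ===== PORT B =====
def SQLCleanString_alt (c_str : String) : String :=
  let filtered := String.ofList (c_str.toList.filter (fun c => 31 < c.toNat && c.toNat < 127))
  PySem.Str.replace filtered "'" "''"

-- ===== PRECONDITION & SPEC =====
def Spec_SQLCleanString (c_str : String) (out : String) : Prop := out = SQLCleanString_alt c_str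
instance (c_str : String) (out : String) : Decidable (Spec_SQLCleanString c_str out) := by unfold Spec_SQLCleanString; infer_instance

-- ===== CLAIM (what is proved, stated in full; the proofs are below) =====
def Claim_equal_SQLCleanString : Prop := ∀ (c_str : String), Dom_SQLCleanString c_str → Spec_SQLCleanString c_str (SQLCleanString c_str)

-- ===== LEMMAS AND PROOFS =====

-- replace with a single-character pattern is a flatMap over the characters
theorem replace_go_singleton (q : Char) (new : List Char) :
    ∀ (l acc : List Char),
      PySem.Chars.replace.go [q] new l.length l acc =
        acc.reverse ++ l.flatMap (fun c => if c = q then new else [c]) := by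
  intro l
  induction l with
  | nil => intro acc; simp [PySem.Chars.replace.go]
  | cons c t ih =>
      intro acc
      by_cases h : q = c
      · subst h
        simp [List.length_cons, PySem.Chars.replace.go, List.isPrefixOf, ih]
      · have hp : [q].isPrefixOf (c :: t) = false := by
          simp [List.isPrefixOf]; intro hqc; exact absurd hqc h
        have hcq : ¬ c = q := fun hh => h hh.symm
        simp [List.length_cons, PySem.Chars.replace.go, hp, ih, hcq]

theorem replace_singleton (q : Char) (new l : List Char) :
    PySem.Chars.replace l [q] new = l.flatMap (fun c => if c = q then new else [c]) := by
  have := replace_go_singleton q new l []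
  simpa [PySem.Chars.replace] using this

-- A's fold equals filter-then-flatMap
theorem fold_eq_flatMap_filter (cs : List Char) :
    ∀ acc : List Char,
      cs.foldl (fun v_str c =>
        if c.toNat < 127 && 31 < c.toNat then
          if c == '\'' then v_str ++ ['\'', '\''] else v_str ++ [c]
        else v_str) acc =
      acc ++ (cs.filter (fun c => 31 < c.toNat && c.toNat < 127)).flatMap
        (fun c => if c = '\'' then ['\'', '\''] else [c]) := by
  induction cs with
  | nil => intro acc; simp
  | cons c t ih =>
      intro acc
      rw [List.foldl_cons, ih]
      by_cases h31 : 31 < c.toNat <;> by_cases h127 : c.toNat < 127 <;>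
        by_cases hq : c = '\'' <;>
          simp [h31, h127, hq, List.append_assoc]

-- ===== VERDICT (by name: the statement is the Claim_ definition above) =====
theorem SQLCleanString_spec : Claim_equal_SQLCleanString := by
  intro c_str _
  unfold Spec_SQLCleanString SQLCleanString SQLCleanString_alt
  have hfold := PySem.List.foldl_pyRange_pyGetD (xs := c_str.toList) (d := ' ')
    (f := fun v_str c =>
      if c.toNat < 127 && 31 < c.toNat then
        if c == '\'' then v_str ++ ['\'', '\''] else v_str ++ [c]
      else v_str) (init := ([] : List Char)) (a := 0) le_rfl
  simp only [Int.toNat_zero, List.drop_zero] at hfold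
  apply String.ext
  simp only [PySem.Str.toList_replace, String.toList_ofList, hfold,
    fold_eq_flatMap_filter, List.nil_append]
  rw [show ("'" : String).toList = ['\''] from rfl,
      show ("''" : String).toList = ['\'', '\''] from rfl,
      replace_singleton]
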